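-- pv_equiv track=rewrite | github.com/Uninett/nav | subsystem/maintenance2/nav/web/maintenance2/maintenance2.py | sortComponents
-- ===== SOURCE A (Python) =====
-- def sortComponents(components):
--     """
--     Sort components in the following order:
--     location, room, netbox, service
--
--     Input:
--         components  List of components to be sorted
--
--     Returns:
--         A sorted list of the components
--
--     """
--
--     results = []
--
--     for i, component in enumerate(components):
--         if components[i]['key'] == 'location':
--             results.append(components[i])
--
--     for i, component in enumerate(components):
--         if components[i]['key'] == 'room':
--             results.append(components[i])
--
--     for i, component in enumerate(components):
--         if components[i]['key'] == 'netbox':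
--             results.append(components[i])
--
--     for i, component in enumerate(components):
--         if components[i]['key'] == 'service':
--             results.append(components[i])
--
--     return results
-- ===== SOURCE B (Python) =====
-- def sortComponents(components):
--     buckets = {'location': [], 'room': [], 'netbox': [], 'service': []}
--     for component in components:
--         key = component['key']
--         if key in buckets:
--             buckets[key].append(component)
--     return (buckets['location'] + buckets['room']
--             + buckets['netbox'] + buckets['service'])
-- ===== Notes on version B (the rewrite author's own statement) =====
-- stated objective: simpler
-- what changed: Replaces four sequential full scans (one per key) with a single pass that distributes components into four buckets, returning the buckets concatenated in the fixed priority order.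
import Mathlib
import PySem

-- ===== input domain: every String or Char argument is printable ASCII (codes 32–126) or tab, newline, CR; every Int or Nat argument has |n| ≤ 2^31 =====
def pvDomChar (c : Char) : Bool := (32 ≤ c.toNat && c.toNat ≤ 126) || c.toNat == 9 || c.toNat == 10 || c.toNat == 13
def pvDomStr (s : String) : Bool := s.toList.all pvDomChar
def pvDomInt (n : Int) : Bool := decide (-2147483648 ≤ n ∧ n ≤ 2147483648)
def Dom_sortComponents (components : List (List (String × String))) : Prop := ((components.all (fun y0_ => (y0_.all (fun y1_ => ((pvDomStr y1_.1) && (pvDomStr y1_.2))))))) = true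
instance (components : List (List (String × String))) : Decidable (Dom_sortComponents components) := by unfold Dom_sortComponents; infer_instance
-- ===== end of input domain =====

-- B replaces A's four sequential full scans by one bucket-building pass followed by a
-- fixed-order concatenation (objective: simpler). Equivalence is about return values.

-- ===== PORT A =====
-- A: four passes over components; each pass appends the components whose 'key' equals
-- the pass's key name, in order location, room, netbox, service.
def sortComponentsPass (components : List (List (String × String)))
    (k : String) (results : List (List (String × String))) : List (List (String × String)) :=
  components.foldl
    (fun acc c => if List.lookup "key" c == some k then acc ++ [c] else acc) results

def sortComponents (components : List (List (String × String))) : List (List (String × String)) :=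
  let results : List (List (String × String)) := []
  let results := sortComponentsPass components "location" results
  let results := sortComponentsPass components "room" results
  let results := sortComponentsPass components "netbox" results
  let results := sortComponentsPass components "service" results
  results

-- ===== PORT B =====
-- B: one pass distributing each component into one of four buckets, then concatenation.
def sortComponentsStep
    (b : List (List (String × String)) × List (List (String × String)) ×
         List (List (String × String)) × List (List (String × String)))
    (c : List (String × String)) :
    List (List (String × String)) × List (List (String × String)) ×
    List (List (String × String)) × List (List (String × String)) :=
  let key := List.lookup "key" c
  if key == some "location" then (b.1 ++ [c], b.2.1, b.2.2.1, b.2.2.2)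
  else if key == some "room" then (b.1, b.2.1 ++ [c], b.2.2.1, b.2.2.2)
  else if key == some "netbox" then (b.1, b.2.1, b.2.2.1 ++ [c], b.2.2.2)
  else if key == some "service" then (b.1, b.2.1, b.2.2.1, b.2.2.2 ++ [c])
  else b

def sortComponents_alt (components : List (List (String × String))) : List (List (String × String)) :=
  let b := components.foldl sortComponentsStep ([], [], [], [])
  b.1 ++ b.2.1 ++ b.2.2.1 ++ b.2.2.2

-- ===== PRECONDITION & SPEC =====
-- Pre_ excludes components without a 'key' entry: there Python A (and Python B) raise KeyError.
def Pre_sortComponents (components : List (List (String × String))) : Prop :=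
  ∀ c ∈ components, (List.lookup "key" c).isSome = true
instance (components : List (List (String × String))) : Decidable (Pre_sortComponents components) := by
  unfold Pre_sortComponents; infer_instance

def pvWitness_sortComponents : (List (List (String × String))) :=
  [[("key", "service")], [("key", "location"), ("a", "b")], [("key", "room")]]

def Spec_sortComponents (components : List (List (String × String))) (out : List (List (String × String))) : Prop := out = sortComponents_alt components
instance (components : List (List (String × String))) (out : List (List (String × String))) : Decidable (Spec_sortComponents components out) := by unfold Spec_sortComponents; infer_instance

-- ===== CLAIM (what is proved, stated in full; the proofs are below) =====
def Claim_equal_sortComponents : Prop := ∀ (components : List (List (String × String))), Dom_sortComponents components → Pre_sortComponents components → Spec_sortComponents components (sortComponents components)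

-- ===== LEMMAS AND PROOFS =====

def keyFilt (k : String) (cs : List (List (String × String))) : List (List (String × String)) :=
  cs.filter (fun c => List.lookup "key" c == some k)

theorem pass_eq (cs : List (List (String × String))) (k : String)
    (acc : List (List (String × String))) :
    sortComponentsPass cs k acc = acc ++ keyFilt k cs := by
  induction cs generalizing acc with
  | nil => simp [sortComponentsPass, keyFilt]
  | cons c cs ih =>
    show sortComponentsPass (c :: cs)  k acc = _
    rw [sortComponentsPass, List.foldl_cons]
    by_cases h : (List.lookup "key" c == some k) = true
    · rw [if_pos h, show List.foldl _ _ cs = sortComponentsPass cs k (acc ++ [c]) from rfl,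
        ih]
      simp [keyFilt, h]
    · rw [if_neg h, show List.foldl _ _ cs = sortComponentsPass cs k acc from rfl,
        ih]
      simp [keyFilt, h]

theorem step_inv (cs : List (List (String × String)))
    (l r n s : List (List (String × String))) :
    cs.foldl sortComponentsStep (l, r, n, s) =
      (l ++ keyFilt "location" cs, r ++ keyFilt "room" cs,
       n ++ keyFilt "netbox" cs, s ++ keyFilt "service" cs) := by
  induction cs generalizing l r n s with
  | nil => simp [keyFilt]
  | cons c cs ih =>
    simp only [List.foldl_cons, keyFilt, List.filter_cons]
    rcases hk : List.lookup "key" c with _ | k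
    · simpa [sortComponentsStep, hk, keyFilt] using ih l r n s
    · by_cases h1 : k = "location"
      · simpa [sortComponentsStep, hk, h1, keyFilt] using ih (l ++ [c]) r n s
      by_cases h2 : k = "room"
      · simpa [sortComponentsStep, hk, h1, h2, keyFilt] using ih l (r ++ [c]) n s
      by_cases h3 : k = "netbox"
      · simpa [sortComponentsStep, hk, h1, h2, h3, keyFilt] using ih l r (n ++ [c]) s
      by_cases h4 : k = "service"
      · simpa [sortComponentsStep, hk, h1, h2, h3, h4, keyFilt] using ih l r n (s ++ [c])
      · simpa [sortComponentsStep, hk, h1, h2, h3, h4, keyFilt] using ih l r n s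

-- ===== VERDICT (by name: the statement is the Claim_ definition above) =====
theorem sortComponents_spec : Claim_equal_sortComponents := by
  intro components _ _
  unfold Spec_sortComponents sortComponents sortComponents_alt
  rw [step_inv]
  simp [pass_eq]
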